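-- pv_equiv track=rewrite | github.com/xbrlus/xule | FERC/render.py | format_rule_result_text_part
-- ===== SOURCE A (Python) =====
-- def format_rule_result_text_part(expression_text, part, type, extra_expressions):
--
--     output_dictionary = dict()
--     output_dictionary['type'] = "'{}'".format(type)
--
--
--     if type == 'f':
--         output_dictionary['is-fact'] = 'if exists({exp}) (({exp}).is-fact).string else \'false\''.format(exp=expression_text)
--     if part is None:
--         output_dictionary['value'] = '(if exists({exp}) (({exp})#rv-0).string else (none)#rv-0).string'.format(exp=expression_text)
--     else:
--         output_dictionary['value'] = '(if exists({exp}) (({exp})#rv-{part}).string else (none)#rv-{part}).string'.format(exp=expression_text, part=part)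
--         output_dictionary['part'] = part
--     # Extra expressions (i.e. class, format, scale)
--     for extra_name, extra_expression in extra_expressions.items():
--         output_extra_expressions = "list({})".format(', '.join(extra_expression)) if len(extra_expression) > 0 else None
--         if output_extra_expressions is not None:
--             output_dictionary[extra_name] = output_extra_expressions
--
--     output_items = ("list('{key}', {val})".format(key=k, val=v) for k, v in output_dictionary.items())
--     output_string = "dict({})".format(', '.join(output_items))
--
--     return output_string
--     '''
--     # If the output is not fact then we don't need the is-fact in the result.
--     output_is_fact = None
--     if type == 'f':
--         output_is_fact = 'if exists({exp}) (({exp}).is-fact).string else \'false\''.format(exp=expression_text)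
--     output_class_expressions = ", list('classes', list({}))".format(', '.join(class_expressions)) if len(class_expressions) > 0 else ''
--     if part is None:
--         output_expression = '(if exists({exp}) (({exp})#rv-0).string else (none)#rv-0).string'.format(exp=expression_text)
--         return "dict(list('type', '{type}'), list('is-fact', {is_fact}), list('value', {val}){classes})".format(
--             type=type,
--             is_fact=output_is_fact,
--             val=output_expression,
--             classes=output_class_expressions)
--     else:
--         output_expression = '(if exists({exp}) (({exp})#rv-{part}).string else (none)#rv-{part}).string'.format(exp=expression_text, part=part)
--         return "dict(list('type', '{type}'), list('is-fact', {is_fact}), list('value', {val}), list('part', {part}){classes})".format(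
--             type=type,
--             is_fact=output_is_fact,
--             val=output_expression,
--             part=part,
--             classes=output_class_expressions)
--     '''
-- ===== SOURCE B (Python) =====
-- def format_rule_result_text_part(expression_text, part, type, extra_expressions):
--     # Template-style (as in the commented-out version in the source file): the whole
--     # fixed head is one of four complete format strings chosen by a 2x2 case split;
--     # the extras are appended one by one onto the result string -- no dict, no
--     # fragment list, no outer join.
--     if type == 'f':
--         if part is None:
--             out = "dict(list('type', '{type}'), list('is-fact', if exists({exp}) (({exp}).is-fact).string else 'false'), list('value', (if exists({exp}) (({exp})#rv-0).string else (none)#rv-0).string)".format(type=type, exp=expression_text)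
--         else:
--             out = "dict(list('type', '{type}'), list('is-fact', if exists({exp}) (({exp}).is-fact).string else 'false'), list('value', (if exists({exp}) (({exp})#rv-{part}).string else (none)#rv-{part}).string), list('part', {part})".format(type=type, exp=expression_text, part=part)
--     else:
--         if part is None:
--             out = "dict(list('type', '{type}'), list('value', (if exists({exp}) (({exp})#rv-0).string else (none)#rv-0).string)".format(type=type, exp=expression_text)
--         else:
--             out = "dict(list('type', '{type}'), list('value', (if exists({exp}) (({exp})#rv-{part}).string else (none)#rv-{part}).string), list('part', {part})".format(type=type, exp=expression_text, part=part)
--     for extra_name, extra_expression in extra_expressions.items():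
--         if extra_expression:
--             out += ", list('{}', list({}))".format(extra_name, ', '.join(extra_expression))
--     return out + ")"
-- ===== Notes on version B (the rewrite author's own statement) =====
-- stated objective: alternative
-- what changed: B replaces A's dict-of-fragments plus join-over-items pipeline with a 2x2 case split choosing one of four complete head templates (type/is-fact/value/part in a single format string, mirroring the commented-out version in the source file) and then appends each kept extras fragment directly onto the result string, with no dictionary, no fragment list and no outer join.
import Mathlib
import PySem

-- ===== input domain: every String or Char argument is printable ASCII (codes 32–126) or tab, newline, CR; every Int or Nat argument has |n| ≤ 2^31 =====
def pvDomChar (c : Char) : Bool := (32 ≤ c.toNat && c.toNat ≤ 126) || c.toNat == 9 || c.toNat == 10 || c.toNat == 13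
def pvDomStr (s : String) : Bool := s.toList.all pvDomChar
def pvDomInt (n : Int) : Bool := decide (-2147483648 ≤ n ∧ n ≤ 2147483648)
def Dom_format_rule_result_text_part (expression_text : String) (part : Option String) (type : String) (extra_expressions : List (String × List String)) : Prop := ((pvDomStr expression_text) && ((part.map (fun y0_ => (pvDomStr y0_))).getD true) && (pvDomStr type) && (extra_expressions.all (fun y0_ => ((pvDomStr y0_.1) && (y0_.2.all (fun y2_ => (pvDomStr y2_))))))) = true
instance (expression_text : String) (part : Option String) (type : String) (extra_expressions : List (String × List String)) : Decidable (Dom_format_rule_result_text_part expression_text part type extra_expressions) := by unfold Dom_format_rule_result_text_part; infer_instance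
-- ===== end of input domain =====

-- B picks one of four complete head templates by a 2x2 case split (as in the
-- commented-out version in the source file) and appends the extras onto the result
-- string one by one, instead of A's dict-of-fragments + join-over-items pipeline
-- (objective: alternative).


-- ===== PORT A =====
def format_rule_result_text_part (expression_text : String) (part : Option String) (type : String) (extra_expressions : List (String × List String)) : String :=
  let d0 : PySem.Dict String String := PySem.Dict.empty
  let d1 := d0.insert "type" ("'" ++ type ++ "'")
  let d2 := if type == "f" then
      d1.insert "is-fact" ("if exists(" ++ expression_text ++ ") ((" ++ expression_text ++ ").is-fact).string else 'false'")
    else d1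
  let d3 := match part with
    | none => d2.insert "value" ("(if exists(" ++ expression_text ++ ") ((" ++ expression_text ++ ")#rv-0).string else (none)#rv-0).string")
    | some p => (d2.insert "value" ("(if exists(" ++ expression_text ++ ") ((" ++ expression_text ++ ")#rv-" ++ p ++ ").string else (none)#rv-" ++ p ++ ").string")).insert "part" p
  let d4 := extra_expressions.foldl (fun d pr =>
      if pr.2.length > 0 then d.insert pr.1 ("list(" ++ PySem.Str.join ", " pr.2 ++ ")") else d) d3
  "dict(" ++ PySem.Str.join ", " (d4.items.map (fun kv => "list('" ++ kv.1 ++ "', " ++ kv.2 ++ ")")) ++ ")"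

-- ===== PORT B =====
def format_rule_result_text_part_alt (expression_text : String) (part : Option String) (type : String) (extra_expressions : List (String × List String)) : String :=
  let out :=
    if type == "f" then
      match part with
      | none => "dict(list('type', '" ++ type ++ "'), list('is-fact', if exists(" ++ expression_text ++ ") ((" ++ expression_text ++ ").is-fact).string else 'false'), list('value', (if exists(" ++ expression_text ++ ") ((" ++ expression_text ++ ")#rv-0).string else (none)#rv-0).string)"
      | some p => "dict(list('type', '" ++ type ++ "'), list('is-fact', if exists(" ++ expression_text ++ ") ((" ++ expression_text ++ ").is-fact).string else 'false'), list('value', (if exists(" ++ expression_text ++ ") ((" ++ expression_text ++ ")#rv-" ++ p ++ ").string else (none)#rv-" ++ p ++ ").string), list('part', " ++ p ++ ")"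
    else
      match part with
      | none => "dict(list('type', '" ++ type ++ "'), list('value', (if exists(" ++ expression_text ++ ") ((" ++ expression_text ++ ")#rv-0).string else (none)#rv-0).string)"
      | some p => "dict(list('type', '" ++ type ++ "'), list('value', (if exists(" ++ expression_text ++ ") ((" ++ expression_text ++ ")#rv-" ++ p ++ ").string else (none)#rv-" ++ p ++ ").string), list('part', " ++ p ++ ")"
  let out2 := extra_expressions.foldl (fun out pr =>
      if pr.2.length > 0 then out ++ (", list('" ++ pr.1 ++ "', list(" ++ PySem.Str.join ", " pr.2 ++ "))") else out) out
  out2 ++ ")"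

-- ===== PRECONDITION & SPEC =====
-- Pre_ excludes extra-expression names that duplicate each other or collide with the built-in
-- keys 'type'/'is-fact'/'value'/'part': there A's dict overwrite-in-place (keep-first-position)
-- behaviour is accidental, while B simply emits the fragments in order.
def Pre_format_rule_result_text_part (expression_text : String) (part : Option String) (type : String) (extra_expressions : List (String × List String)) : Prop :=
  (extra_expressions.map Prod.fst).Nodup ∧
  ∀ pr ∈ extra_expressions, pr.1 ∉ (["type", "is-fact", "value", "part"] : List String)
instance (expression_text : String) (part : Option String) (type : String) (extra_expressions : List (String × List String)) : Decidable (Pre_format_rule_result_text_part expression_text part type extra_expressions) := by unfold Pre_format_rule_result_text_part; infer_instance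

def pvWitness_format_rule_result_text_part : String × Option String × String × (List (String × List String)) :=
  ("e", some "3", "f", [("classes", ["x", "y"]), ("scale", [])])

def Spec_format_rule_result_text_part (expression_text : String) (part : Option String) (type : String) (extra_expressions : List (String × List String)) (out : String) : Prop := out = format_rule_result_text_part_alt expression_text part type extra_expressions
instance (expression_text : String) (part : Option String) (type : String) (extra_expressions : List (String × List String)) (out : String) : Decidable (Spec_format_rule_result_text_part expression_text part type extra_expressions out) := by unfold Spec_format_rule_result_text_part; infer_instance

-- ===== CLAIM (what is proved, stated in full; the proofs are below) =====
def Claim_equal_format_rule_result_text_part : Prop := ∀ (expression_text : String) (part : Option String) (type : String) (extra_expressions : List (String × List String)), Dom_format_rule_result_text_part expression_text part type extra_expressions → Pre_format_rule_result_text_part expression_text part type extra_expressions → Spec_format_rule_result_text_part expression_text part type extra_expressions (format_rule_result_text_part expression_text part type extra_expressions)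

-- ===== LEMMAS AND PROOFS =====

-- plain concatenation of a list of strings (proof-side accumulator shape)
def pvCat : List String → String
  | [] => ""
  | x :: xs => x ++ pvCat xs

-- B's accumulator loop over the extras appends the concatenation of the kept fragments.
theorem foldl_append_if_eq_cat (l : List (String × List String)) (a : String) :
    l.foldl (fun out pr => if pr.2.length > 0 then out ++ (", list('" ++ pr.1 ++ "', list(" ++ PySem.Str.join ", " pr.2 ++ "))") else out) a
      = a ++ pvCat ((l.filter (fun pr => pr.2.length > 0)).map
          (fun pr => ", list('" ++ pr.1 ++ "', list(" ++ PySem.Str.join ", " pr.2 ++ "))")) := by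
  induction l generalizing a with
  | nil => simp [pvCat]
  | cons x xs ih =>
    by_cases h : x.2.length > 0
    · rw [List.foldl_cons, if_pos h, ih, List.filter_cons_of_pos (by simpa using h), List.map_cons]
      simp only [pvCat]
      rw [String.append_assoc]
    · rw [List.foldl_cons, if_neg h, ih, List.filter_cons_of_neg (by simpa using h)]

theorem strJoin_singleton (x : String) : PySem.Str.join ", " [x] = x := by
  rw [← String.toList_inj]; simp [PySem.Chars.join_singleton]

theorem strJoin_cons_cons (x y : String) (ys : List String) :
    PySem.Str.join ", " (x :: y :: ys) = x ++ ", " ++ PySem.Str.join ", " (y :: ys) := by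
  rw [← String.toList_inj]; simp [PySem.Chars.join_cons_cons]


-- A's conditional-insert loop is the insert loop over the kept (non-empty) entries.
theorem foldl_insert_if_eq_filter (l : List (String × List String)) (d : PySem.Dict String String) :
    l.foldl (fun d pr => if pr.2.length > 0 then d.insert pr.1 ("list(" ++ PySem.Str.join ", " pr.2 ++ ")") else d) d
      = (l.filter (fun pr => pr.2.length > 0)).foldl (fun d pr => d.insert pr.1 ("list(" ++ PySem.Str.join ", " pr.2 ++ ")")) d := by
  induction l generalizing d with
  | nil => rfl
  | cons x xs ih =>
    by_cases h : x.2.length > 0 <;> simp [List.foldl_cons, h, ih]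

theorem strJoin_snoc (xs : List String) (y : String) (h : xs ≠ []) :
    PySem.Str.join ", " (xs ++ [y]) = PySem.Str.join ", " xs ++ (", " ++ y) := by
  induction xs with
  | nil => exact absurd rfl h
  | cons x xs ih =>
    cases xs with
    | nil => simp [strJoin_cons_cons, strJoin_singleton, String.append_assoc]
    | cons z zs =>
      simp only [List.cons_append]
      rw [strJoin_cons_cons x z (zs ++ [y]),
        show z :: (zs ++ [y]) = (z :: zs) ++ [y] from rfl, ih (by simp),
        strJoin_cons_cons x z zs, String.append_assoc, String.append_assoc, String.append_assoc]

-- joining a nonempty head list ++ a tail list = joined head ++ the ", "-prefixed tail pieces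
theorem join_append_suffix (ys xs : List String) (h : xs ≠ []) :
    PySem.Str.join ", " (xs ++ ys) = PySem.Str.join ", " xs ++ pvCat (ys.map (fun y => ", " ++ y)) := by
  induction ys generalizing xs with
  | nil => simp [pvCat]
  | cons y ys ih =>
    have : xs ++ y :: ys = (xs ++ [y]) ++ ys := by simp
    rw [this, ih _ (by simp), strJoin_snoc _ _ h, List.map_cons, pvCat, String.append_assoc]

set_option maxHeartbeats 1600000 in
set_option maxRecDepth 4000 in
theorem format_rule_result_text_part_spec : Claim_equal_format_rule_result_text_part := by
  intro e part t extras _hdom hpre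
  obtain ⟨hnodup, hres⟩ := hpre
  unfold Spec_format_rule_result_text_part
  have hnd : ((extras.filter (fun pr => pr.2.length > 0)).map Prod.fst).Nodup :=
    ((List.filter_sublist (p := fun pr => decide (pr.2.length > 0))).map Prod.fst).nodup hnodup
  simp only [format_rule_result_text_part, format_rule_result_text_part_alt]
  rw [foldl_insert_if_eq_filter, foldl_append_if_eq_cat]
  rcases part with _ | p <;> by_cases ht : t == "f" <;>
    · simp only [ht, if_true]
      rw [PySem.Dict.items_foldl_insert_fresh _ Prod.fst _ _
        (by intro a ha
            have := hres a (List.mem_of_mem_filter ha)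
            simp only [List.mem_cons, not_or] at this
            simp [PySem.Dict.contains_insert, PySem.Dict.contains_empty, this.1, this.2.1,
              this.2.2.1, this.2.2.2]) hnd]
      rw [List.map_append, join_append_suffix _ _ (by simp [PySem.Dict.items_insert_of_not_contains, PySem.Dict.contains_insert, PySem.Dict.empty])]
      simp only [List.map_map]
      rw [show ((fun y => ", " ++ y) ∘ (fun kv : String × String => "list('" ++ kv.1 ++ "', " ++ kv.2 ++ ")") ∘ (fun a : String × List String => (a.1, "list(" ++ PySem.Str.join ", " a.2 ++ ")")))
            = (fun pr : String × List String => ", list('" ++ pr.1 ++ "', list(" ++ PySem.Str.join ", " pr.2 ++ "))")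
          from funext fun a => by rw [← String.toList_inj]; simp [Function.comp]]
      rw [← String.toList_inj]
      simp [PySem.Dict.items_insert_of_not_contains, PySem.Dict.contains_insert,
        PySem.Dict.empty, strJoin_cons_cons, strJoin_singleton]
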